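-- pv_equiv track=rewrite | github.com/GoesUp/ProjectEuler | Problem054.py | three_of_a_kind
-- ===== SOURCE A (Python) =====
-- from collections import Counter
--
-- cards = {"2": 2, "3": 3, "4": 4, "5": 5, "6": 6, "7": 7, "8": 8, "9": 9, "T": 10, "J": 11, "Q": 12, "K": 13, "A": 14}
--
-- def three_of_a_kind(cards1, cards2):
--     values1, values2 = [cards[i[0]] for i in cards1], [cards[i[0]] for i in cards2]
--     values1, values2 = dict(Counter(values1)), dict(Counter(values2))
--     if max(values1.values()) == 3:
--         if max(values2.values()) == 3:
--             if max(values1, key=values1.get) > max(values2, key=values2.get):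
--                 return 1
--             elif max(values1, key=values1.get) < max(values2, key=values2.get):
--                 return -1
--             else:
--                 return high_card(cards1, cards2)
--         else:
--             return 1
--     elif max(values2.values()) == 3:
--         return -1
--     return 0
--
-- def high_card(cards1, cards2):
--     values1, values2 = sorted([cards[i[0]] for i in cards1])[::-1], sorted([cards[i[0]] for i in cards2])[::-1]
--     for a, b in zip(values1, values2):
--         if a > b:
--             return 1
--         elif b > a:
--             return -1
-- ===== SOURCE B (Python) =====
-- cards = {"2": 2, "3": 3, "4": 4, "5": 5, "6": 6, "7": 7, "8": 8, "9": 9, "T": 10, "J": 11, "Q": 12, "K": 13, "A": 14}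
--
-- def _sorted_vals(hand):
--     return sorted(cards[c[0]] for c in hand)
--
-- def _triple_rank(s):
--     # s is sorted, so a value occurs >= k+1 times iff s[i] == s[i+k] for some i
--     if any(a == b for a, b in zip(s, s[3:])):
--         return None                # some value occurs four or more times
--     rank = None
--     for a, b in zip(s, s[2:]):
--         if a == b:
--             rank = a               # last (i.e. largest) value occurring three times
--     return rank
--
-- def three_of_a_kind(cards1, cards2):
--     s1, s2 = _sorted_vals(cards1), _sorted_vals(cards2)
--     r1, r2 = _triple_rank(s1), _triple_rank(s2)
--     if (r1 is None) != (r2 is None):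
--         return -1 if r1 is None else 1
--     if r1 is None:
--         return 0
--     if r1 != r2:
--         return 1 if r1 > r2 else -1
--     for a, b in zip(reversed(s1), reversed(s2)):
--         if a != b:
--             return 1 if a > b else -1
-- ===== Notes on version B (the rewrite author's own statement) =====
-- stated objective: alternative
-- what changed: B replaces A's Counter-dict machinery (max over dict values, argmax over keys) by a sort-based method: each hand's values are sorted once, multiplicities are read off the sorted list by equality tests at distance 2 and 3 (s[i]==s[i+2] means a triple, s[i]==s[i+3] means four-of-a-kind), and the already-sorted lists are reused reversed for the high-card tie-break instead of re-sorting.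
-- outside the precondition, e.g. on three_of_a_kind(['2H', '2D', '2S', '4H', '4D', '4C'], ['3S', '3C', '3H', '2D']): A returns -1, B returns 1; on three_of_a_kind(['3H', '3D', '3S', '2C', '2D'], ['3C', '3S', '3D', '2H', '2S']): A returns None, B returns None; on three_of_a_kind([], ['2H']): A raises ValueError, B returns 0
import Mathlib
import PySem

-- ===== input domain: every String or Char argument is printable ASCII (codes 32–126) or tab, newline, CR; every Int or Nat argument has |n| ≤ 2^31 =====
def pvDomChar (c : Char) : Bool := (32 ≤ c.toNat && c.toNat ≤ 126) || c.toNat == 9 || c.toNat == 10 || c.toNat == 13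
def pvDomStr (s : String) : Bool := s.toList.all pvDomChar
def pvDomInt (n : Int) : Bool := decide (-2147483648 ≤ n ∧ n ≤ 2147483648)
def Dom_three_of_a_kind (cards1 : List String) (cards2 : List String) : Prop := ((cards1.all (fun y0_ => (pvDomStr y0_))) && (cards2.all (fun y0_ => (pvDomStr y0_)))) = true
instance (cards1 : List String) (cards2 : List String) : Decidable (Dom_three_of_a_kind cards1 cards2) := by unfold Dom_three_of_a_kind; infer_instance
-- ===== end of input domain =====

-- B replaces A's Counter-dict machinery by sorting each hand once and reading multiplicities
-- off the sorted list via equality tests at distance 2 and 3, reusing the sorted lists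
-- (reversed) for the high-card tie-break; objective: alternative algorithm, no speed claim.


-- ===== PORT A =====
-- the module-level dict 'cards' (keys are single-character strings; modelled with
-- Char keys, exact since i[0] is one character)
def cardsDictA : PySem.Dict Char Int := PySem.Dict.ofList
  [('2', 2), ('3', 3), ('4', 4), ('5', 5), ('6', 6), ('7', 7), ('8', 8), ('9', 9),
   ('T', 10), ('J', 11), ('Q', 12), ('K', 13), ('A', 14)]

-- cards[i[0]]: i[0] raises IndexError on "" and the lookup raises KeyError on an
-- unknown rank character — both outside Pre_; the 0 defaults are never reached there
def cvalA (s : String) : Int :=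
  match PySem.Str.pyGet? s 0 with
  | some c => (cardsDictA.get? c).getD 0
  | none => 0

def valuesA (h : List String) : List Int := h.map cvalA

-- sorted([...])[::-1]
def sortDescA (v : List Int) : List Int :=
  (PySem.List.slice? (PySem.List.sorted v (fun x => x) false) none none (-1)).getD []

-- the 'for a, b in zip(...)' loop of high_card; none = the loop falls through
-- (Python returns None — outside Pre_)
def highLoopA : List (Int × Int) → Option Int
  | [] => none
  | (a, b) :: t => if a > b then some 1 else if b > a then some (-1) else highLoopA t

def high_cardA (cards1 cards2 : List String) : Option Int :=
  highLoopA ((sortDescA (valuesA cards1)).zip (sortDescA (valuesA cards2)))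

def three_of_a_kind (cards1 : List String) (cards2 : List String) : Int :=
  let d1 := PySem.Dict.counter (valuesA cards1)
  let d2 := PySem.Dict.counter (valuesA cards2)
  -- max(values1.values()) == 3  (max of an empty hand raises ValueError — outside Pre_)
  if PySem.List.max? d1.values (fun x => x) = some 3 then
    if PySem.List.max? d2.values (fun x => x) = some 3 then
      -- max(values1, key=values1.get)
      match PySem.List.max? d1.keys (fun k => d1.getD k 0),
            PySem.List.max? d2.keys (fun k => d2.getD k 0) with
      | some m1, some m2 =>
          if m1 > m2 then 1
          else if m1 < m2 then -1
          else (high_cardA cards1 cards2).getD 0  -- Python returns None on a full tie: outside Pre_, default unreached there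
      | _, _ => 0  -- unreachable: the dicts are nonempty whenever the max test above succeeded
    else 1
  else if PySem.List.max? d2.values (fun x => x) = some 3 then -1
  else 0

-- ===== PORT B =====
-- sorted(cards[c[0]] for c in hand); 'cards' is the same module-level dict
-- (cardsDictA above); c[0] / the lookup raise outside Pre_, 0 defaults unreached there
def sortedValsB (h : List String) : List Int :=
  PySem.List.sorted
    (h.map (fun s =>
      match PySem.Str.pyGet? s 0 with
      | some c => (cardsDictA.get? c).getD 0
      | none => 0))
    (fun x => x) false

-- _triple_rank: on the sorted list, a value occurs >= k+1 times iff s[i] == s[i+k];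
-- the 'for a, b in zip(s, s[2:])' loop keeps the last (largest) value with a triple
def tripleRankB (s : List Int) : Option Int :=
  if (s.zip (s.drop 3)).any (fun p => p.1 == p.2) then none
  else (s.zip (s.drop 2)).foldl (fun r p => if p.1 == p.2 then some p.1 else r) none

-- the 'for a, b in zip(reversed(s1), reversed(s2))' loop; none = falls through
-- (Python returns None — outside Pre_)
def highLoopB : List (Int × Int) → Option Int
  | [] => none
  | (a, b) :: t => if a ≠ b then some (if a > b then 1 else -1) else highLoopB t

def three_of_a_kind_alt (cards1 : List String) (cards2 : List String) : Int :=
  let s1 := sortedValsB cards1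
  let s2 := sortedValsB cards2
  match tripleRankB s1, tripleRankB s2 with
  | none, none => 0
  | none, some _ => -1
  | some _, none => 1
  | some r1, some r2 =>
      if r1 ≠ r2 then (if r1 > r2 then 1 else -1)
      else (highLoopB (s1.reverse.zip s2.reverse)).getD 0  -- Python returns None on a full tie: outside Pre_, default unreached there

-- ===== PRECONDITION & SPEC =====
-- Pre_-side card-rank table (kept separate from both ports)
def pvRankC : Char → Option Int
  | '2' => some 2 | '3' => some 3 | '4' => some 4 | '5' => some 5 | '6' => some 6
  | '7' => some 7 | '8' => some 8 | '9' => some 9 | 'T' => some 10 | 'J' => some 11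
  | 'Q' => some 12 | 'K' => some 13 | 'A' => some 14 | _ => none

def pvVals (h : List String) : List Int :=
  h.map (fun s => (((PySem.Str.pyGet? s 0).bind pvRankC).getD 0))

def pvTriple? (v : List Int) : Option Int :=
  if v.all (fun x => decide (v.count x ≤ 3)) then v.find? (fun x => v.count x == 3)
  else none

def pvDesc (v : List Int) : List Int :=
  ((PySem.List.sorted v (fun x => x) false)).reverse

-- Pre_ excludes: hands that are empty or contain a card with no valid rank character
-- (A raises ValueError/IndexError/KeyError); the full-tie corner (equal triples and
-- identical descending value sequences) on which A and B return None instead of an int;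
-- and hands in which two distinct ranks each occur exactly three times (impossible in a
-- real 5-card hand), where which triple is 'the' triple is unspecified and A's pick by
-- dict-insertion order and B's pick of the larger rank are both defensible.
def Pre_three_of_a_kind (cards1 : List String) (cards2 : List String) : Prop :=
  cards1 ≠ [] ∧ cards2 ≠ [] ∧
  (∀ s ∈ cards1 ++ cards2, (((PySem.Str.pyGet? s 0).bind pvRankC)).isSome = true) ∧
  (∀ v ∈ pvVals cards1, ∀ w ∈ pvVals cards1,
      (pvVals cards1).count v = 3 → (pvVals cards1).count w = 3 → v = w) ∧
  (∀ v ∈ pvVals cards2, ∀ w ∈ pvVals cards2,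
      (pvVals cards2).count v = 3 → (pvVals cards2).count w = 3 → v = w) ∧
  ¬ (pvTriple? (pvVals cards1) = pvTriple? (pvVals cards2) ∧
     (pvTriple? (pvVals cards1)).isSome = true ∧
     ((pvDesc (pvVals cards1)).zip (pvDesc (pvVals cards2))).all
       (fun p => p.1 == p.2) = true)
instance (cards1 : List String) (cards2 : List String) : Decidable (Pre_three_of_a_kind cards1 cards2) := by unfold Pre_three_of_a_kind; infer_instance

def pvWitness_three_of_a_kind : List String × List String :=
  (["3H", "3D", "3S", "KH", "QD"], ["2H", "5D", "7S", "9H", "KD"])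

def Spec_three_of_a_kind (cards1 : List String) (cards2 : List String) (out : Int) : Prop := out = three_of_a_kind_alt cards1 cards2
instance (cards1 : List String) (cards2 : List String) (out : Int) : Decidable (Spec_three_of_a_kind cards1 cards2 out) := by unfold Spec_three_of_a_kind; infer_instance

-- ===== CLAIM (what is proved, stated in full; the proofs are below) =====
def Claim_equal_three_of_a_kind : Prop := ∀ (cards1 : List String) (cards2 : List String), Dom_three_of_a_kind cards1 cards2 → Pre_three_of_a_kind cards1 cards2 → Spec_three_of_a_kind cards1 cards2 (three_of_a_kind cards1 cards2)

-- ===== LEMMAS AND PROOFS =====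

-- A's dict lookup agrees with the Pre_-side rank table on every valid rank character
theorem rank_char_agree (c : Char) :
    (pvRankC c).isSome = true → (cardsDictA.get? c).getD 0 = (pvRankC c).getD 0 := by
  unfold pvRankC
  split <;> intro h <;> first | rfl | simp at h

theorem cval_eq_pv (s : String)
    (h : ((PySem.Str.pyGet? s 0).bind pvRankC).isSome = true) :
    cvalA s = ((PySem.Str.pyGet? s 0).bind pvRankC).getD 0 := by
  unfold cvalA
  cases hg : PySem.Str.pyGet? s 0 with
  | none => rw [hg] at h; simp at h
  | some c =>
    rw [hg] at h
    simp only [Option.bind_some] at h ⊢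
    exact rank_char_agree c h

-- max(xs) (identity key) equals some m iff m is a member and an upper bound
theorem max?_id_eq_some_iff (xs : List Int) (m : Int) :
    PySem.List.max? xs (fun x => x) = some m ↔ m ∈ xs ∧ ∀ y ∈ xs, y ≤ m := by
  constructor
  · intro h
    exact ⟨PySem.List.max?_mem h, PySem.List.max?_isMax h⟩
  · rintro ⟨hmem, hub⟩
    cases xs with
    | nil => simp at hmem
    | cons x t =>
      rw [PySem.List.max?_id_cons]
      have hf := PySem.List.le_foldl_max t x
      have hmem' : List.foldl max x t = x ∨ List.foldl max x t ∈ t := PySem.List.foldl_max_mem t x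
      have h1 : m ≤ List.foldl max x t := by
        rcases List.mem_cons.mp hmem with h | h
        · simpa [h] using hf.1
        · exact hf.2 m h
      have h2 : List.foldl max x t ≤ m := by
        rcases hmem' with h | h
        · rw [h]; exact hub x (by simp)
        · exact hub _ (by simp [h])
      simp [le_antisymm h2 h1]

-- the foldl underlying max? keeps an accumulator that already realises the maximum
theorem foldl_max_acc {α : Type} (key : α → Int) (M : Int) (t : List α) (m : α)
    (hm : key m = M) (hub : ∀ x ∈ t, key x ≤ M) :
    t.foldl (fun acc x => match acc with
      | none => some x
      | some m' => if key m' < key x then some x else some m') (some m) = some m := by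
  induction t with
  | nil => rfl
  | cons y t ih =>
    have hy : ¬ key m < key y := by have := hub y (by simp); omega
    simp only [List.foldl_cons]
    rw [if_neg hy]
    exact ih (fun x hx => hub x (by simp [hx]))

-- …and when it starts strictly below the maximum, the fold lands on the first maximiser
theorem foldl_max_reach {α : Type} (key : α → Int) (M : Int) (t : List α) :
    ∀ (a : α), key a < M → (∀ x ∈ t, key x ≤ M) → (∃ y ∈ t, key y = M) →
    t.foldl (fun acc x => match acc with
      | none => some x
      | some m' => if key m' < key x then some x else some m') (some a)
      = t.find? (fun x => key x == M) := by
  induction t with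
  | nil => rintro a _ _ ⟨y, hy, _⟩; simp at hy
  | cons y t ih =>
    intro a ha hub hex
    by_cases hyM : key y = M
    · simp only [List.foldl_cons, List.find?_cons]
      rw [if_pos (by omega)]
      rw [show (key y == M) = true by simp [hyM]]
      exact foldl_max_acc key M t y hyM (fun x hx => hub x (by simp [hx]))
    · have hyM' : key y < M := by have := hub y (by simp); omega
      have hex' : ∃ z ∈ t, key z = M := by
        rcases hex with ⟨z, hz, hzM⟩
        rcases List.mem_cons.mp hz with h | h
        · exact absurd (h ▸ hzM) hyM
        · exact ⟨z, h, hzM⟩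
      simp only [List.foldl_cons, List.find?_cons]
      rw [show (key y == M) = false by simp [hyM]]
      by_cases hay : key a < key y
      · rw [if_pos hay]
        exact ih y hyM' (fun x hx => hub x (by simp [hx])) hex'
      · rw [if_neg hay]
        exact ih a ha (fun x hx => hub x (by simp [hx])) hex'

-- max(xs, key) is the FIRST element whose key attains the maximum M
theorem max?_eq_find? {α : Type} (key : α → Int) (M : Int) (xs : List α)
    (hub : ∀ x ∈ xs, key x ≤ M) (hex : ∃ y ∈ xs, key y = M) :
    PySem.List.max? xs key = xs.find? (fun x => key x == M) := by
  cases xs with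
  | nil => rcases hex with ⟨y, hy, _⟩; simp at hy
  | cons x t =>
    show List.foldl _ (some x) t = _
    by_cases hxM : key x = M
    · rw [List.find?_cons, show (key x == M) = true by simp [hxM]]
      exact foldl_max_acc key M t x hxM (fun z hz => hub z (by simp [hz]))
    · have hx' : key x < M := by have := hub x (by simp); omega
      rw [List.find?_cons, show (key x == M) = false by simp [hxM]]
      have hex' : ∃ z ∈ t, key z = M := by
        rcases hex with ⟨z, hz, hzM⟩
        rcases List.mem_cons.mp hz with h | h
        · exact absurd (h ▸ hzM) hxM
        · exact ⟨z, h, hzM⟩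
      exact foldl_max_reach key M t x hx' (fun z hz => hub z (by simp [hz])) hex'

-- find? over set(xs) (first occurrences, in order) = find? over xs
theorem find?_ofList {α : Type} [BEq α] [LawfulBEq α] (p : α → Bool) (xs : List α) :
    (PySem.Set.ofList xs).find? p = xs.find? p := by
  induction xs using List.reverseRecOn with
  | nil => rfl
  | append_singleton xs x ih =>
    have hof : PySem.Set.ofList (xs ++ [x]) = PySem.Set.add (PySem.Set.ofList xs) x := by
      simp [PySem.Set.ofList, List.foldl_append]
    rw [hof, List.find?_append]
    unfold PySem.Set.add
    split
    · rename_i hc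
      have hx : x ∈ xs := (PySem.Set.mem_ofList xs x).mp (by simpa using hc)
      rw [ih]
      cases hf : xs.find? p with
      | some v => simp
      | none =>
        have := List.find?_eq_none.mp hf x hx
        simp [List.find?, this]
    · rw [List.find?_append, ih]

-- Counter(v).values() as counts over the distinct values
theorem counter_values (v : List Int) :
    (PySem.Dict.counter v).values
      = (PySem.Set.ofList v).map (fun k => ((v.count k : Int))) := by
  have h := PySem.Dict.items_counter v
  simp only [PySem.Dict.values, h, List.map_map]
  rfl

-- A's branch test 'max(Counter(v).values()) == 3' in terms of plain counts
theorem counterMax3_iff (v : List Int) :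
    (PySem.List.max? (PySem.Dict.counter v).values (fun x => x) = some 3)
      ↔ ((∀ x ∈ v, v.count x ≤ 3) ∧ ∃ x ∈ v, v.count x = 3) := by
  rw [counter_values, max?_id_eq_some_iff]
  constructor
  · rintro ⟨hmem, hub⟩
    constructor
    · intro x hx
      have hle : ((v.count x : Int)) ≤ 3 :=
        hub _ (List.mem_map.mpr ⟨x, (PySem.Set.mem_ofList v x).mpr hx, rfl⟩)
      exact_mod_cast hle
    · rcases List.mem_map.mp hmem with ⟨k, hk, hk3⟩
      exact ⟨k, (PySem.Set.mem_ofList v k).mp hk, by exact_mod_cast hk3⟩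
  · rintro ⟨hub, x, hxv, hx3⟩
    refine ⟨List.mem_map.mpr ⟨x, (PySem.Set.mem_ofList v x).mpr hxv, by simp [hx3]⟩, ?_⟩
    intro y hy
    rcases List.mem_map.mp hy with ⟨k, hk, rfl⟩
    have := hub k ((PySem.Set.mem_ofList v k).mp hk)
    exact_mod_cast this

-- A's 'max(Counter(v), key=Counter(v).get)' is the first value of v whose count is 3
theorem counter_argmax (v : List Int)
    (hub : ∀ x ∈ v, v.count x ≤ 3) (hex : ∃ x ∈ v, v.count x = 3) :
    PySem.List.max? (PySem.Dict.counter v).keys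
      (fun k => (PySem.Dict.counter v).getD k 0)
      = v.find? (fun x => v.count x == 3) := by
  have hkey : (fun k => (PySem.Dict.counter v).getD k 0)
      = fun k => ((v.count k : Int)) := by
    funext k; exact PySem.Dict.getD_counter v k
  rw [PySem.Dict.keys_counter, hkey]
  rcases hex with ⟨x, hxv, hx3⟩
  have hub' : ∀ k ∈ PySem.Set.ofList v, ((v.count k : Int)) ≤ 3 := by
    intro k hk
    have := hub k ((PySem.Set.mem_ofList v k).mp hk)
    exact_mod_cast this
  have hex' : ∃ k ∈ PySem.Set.ofList v, ((v.count k : Int)) = 3 :=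
    ⟨x, (PySem.Set.mem_ofList v x).mpr hxv, by simp [hx3]⟩
  rw [max?_eq_find? _ 3 _ hub' hex', find?_ofList]
  congr 1
  funext k
  by_cases hk : v.count k = 3
  · simp [hk]
  · simp [hk]; omega

-- sorted prefix lemma: if x is below every element of a sorted list that contains it
-- at least k times, the first k elements are all x
theorem sorted_take_replicate (t : List Int) :
    ∀ (k : Nat) (x : Int), t.Pairwise (· ≤ ·) → (∀ z ∈ t, x ≤ z) →
    k ≤ t.count x → t.take k = List.replicate k x := by
  induction t with
  | nil =>
    intro k x _ _ hk
    have hk0 : k = 0 := by simpa using hk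
    subst hk0; simp
  | cons y u ih =>
    intro k x hp hlb hk
    cases k with
    | zero => simp
    | succ k' =>
      have hyu : ∀ z ∈ u, y ≤ z := (List.pairwise_cons.mp hp).1
      have hpu : u.Pairwise (· ≤ ·) := (List.pairwise_cons.mp hp).2
      by_cases hxy : y = x
      · subst hxy
        have : u.take k' = List.replicate k' y := by
          apply ih k' y hpu hyu
          have : (y :: u).count y = u.count y + 1 := by simp
          omega
        simp [List.take_succ_cons, this, List.replicate_succ]
      · exfalso
        have hxy' : x < y := lt_of_le_of_ne (hlb y (by simp)) (fun h => hxy h.symm)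
        have hcu : u.count x = 0 := by
          rw [List.count_eq_zero]
          intro hxu
          exact absurd (hyu x hxu) (by omega)
        have : (y :: u).count x = u.count x := by
          rw [List.count_cons]
          simp [show ¬ (y == x) = true by simp; omega]
        omega

-- on a sorted list, an equal pair at distance m+1 means its value occurs m+2 times
theorem zip_eq_count (L : List Int) :
    ∀ (m : Nat) (a b : Int), L.Pairwise (· ≤ ·) →
    (a, b) ∈ L.zip (L.drop (m + 1)) → a = b → m + 2 ≤ L.count a := by
  induction L with
  | nil => intro m a b _ hm _; simp at hm
  | cons x t ih =>
    intro m a b hp hm hab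
    have hxt : ∀ z ∈ t, x ≤ z := (List.pairwise_cons.mp hp).1
    have hpt : t.Pairwise (· ≤ ·) := (List.pairwise_cons.mp hp).2
    rw [List.drop_succ_cons] at hm
    cases hd : t.drop m with
    | nil => rw [hd] at hm; simp at hm
    | cons h0 rest =>
      have hrest : rest = t.drop (m + 1) := by
        have : t.drop (m + 1) = (t.drop m).tail := by
          rw [← List.drop_drop]; simp [Nat.add_comm]
        rw [this, hd]; rfl
      rw [hd] at hm
      rw [List.zip_cons_cons] at hm
      rcases List.mem_cons.mp hm with heq | hmem
      · -- (a, b) = (x, h0), and a = b, so h0 = x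
        have hax : a = x := by cases heq; rfl
        have hbh : b = h0 := by cases heq; rfl
        subst hax; subst hbh
        -- first m elements of t are all between x and h0 = x
        have hm_lt : m < t.length := by
          by_contra hcon
          rw [List.drop_eq_nil_iff.mpr (by omega)] at hd
          exact absurd hd (by simp)
        have hsplit : t = t.take m ++ t.drop m := (List.take_append_drop m t).symm
        have htake_all : ∀ z ∈ t.take m, z = a := by
          intro z hz
          have hz' : z ∈ t := List.mem_of_mem_take hz
          have h1 : a ≤ z := hxt z hz'
          have h2 : z ≤ b := by
            have hpw := hsplit ▸ hpt
            have := (List.pairwise_append.mp hpw).2.2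
            exact this z hz b (by rw [hd]; simp)
          omega
        have hlen : (t.take m).length = m := by
          rw [List.length_take]; omega
        have hcnt_take : (t.take m).count a = m := by
          have h2 : (t.take m).count a = (t.take m).length :=
            List.count_eq_length.mpr (fun z hz => (htake_all z hz).symm)
          rw [h2, hlen]
        have hcnt_drop : 1 ≤ (t.drop m).count a := by
          rw [hd]
          have : (a == b) = true := by simp [hab]
          simp [List.count_cons, hab]
        have : t.count a = (t.take m).count a + (t.drop m).count a := by
          conv_lhs => rw [hsplit]
          rw [List.count_append]
        have hca : (a :: t).count a = t.count a + 1 := by simp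
        omega
      · have := ih m a b hpt (by rw [← hrest]; exact hmem) hab
        have : (x :: t).count a = t.count a + (if x == a then 1 else 0) := by
          rw [List.count_cons]
        split at this <;> omega

-- converse: m+2 occurrences of v in a sorted list yield the pair (v, v) at distance m+1
theorem count_zip_mem (L : List Int) :
    ∀ (m : Nat) (v : Int), L.Pairwise (· ≤ ·) →
    m + 2 ≤ L.count v → (v, v) ∈ L.zip (L.drop (m + 1)) := by
  induction L with
  | nil => intro m v _ hc; simp at hc
  | cons x t ih =>
    intro m v hp hc
    have hxt : ∀ z ∈ t, x ≤ z := (List.pairwise_cons.mp hp).1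
    have hpt : t.Pairwise (· ≤ ·) := (List.pairwise_cons.mp hp).2
    rw [List.drop_succ_cons]
    by_cases hvx : v = x
    · subst hvx
      have hct : m + 1 ≤ t.count v := by
        have : (v :: t).count v = t.count v + 1 := by simp
        omega
      have htake : t.take (m + 1) = List.replicate (m + 1) v :=
        sorted_take_replicate t (m + 1) v hpt hxt hct
      have hmlt : m < t.length := by
        have := List.count_le_length (l := t) (a := v)
        omega
      have hdrop : t.drop m = t[m] :: t.drop (m + 1) := List.drop_eq_getElem_cons hmlt
      have hgm : t[m] = v := by
        have hmem' : t[m] ∈ t.take (m + 1) := by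
          have h1 : (t.take (m + 1))[m]'(by rw [List.length_take]; omega) = t[m] :=
            List.getElem_take
          rw [← h1]
          exact List.getElem_mem _
        rw [htake] at hmem'
        exact List.eq_of_mem_replicate hmem'
      rw [hdrop, hgm, List.zip_cons_cons]
      exact List.mem_cons_self
    · have hct : m + 2 ≤ t.count v := by
        have h1 : (x :: t).count v = t.count v + (if x == v then 1 else 0) := by
          rw [List.count_cons]
        have hxv : ¬ ((x == v) = true) := by simp; exact fun h => hvx h.symm
        rw [if_neg hxv] at h1
        omega
      have hmem := ih m v hpt hct
      have hmlt : m < t.length := by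
        have := List.count_le_length (l := t) (a := v)
        omega
      have hdrop : t.drop m = t[m] :: t.drop (m + 1) := List.drop_eq_getElem_cons hmlt
      rw [hdrop, List.zip_cons_cons]
      exact List.mem_cons_of_mem _ hmem

-- the rank-scan fold: a some result comes from an equal pair in the list
theorem scan_some_mem (ps : List (Int × Int)) :
    ∀ (acc : Option Int) (r : Int),
    ps.foldl (fun r p => if p.1 == p.2 then some p.1 else r) acc = some r →
    acc = some r ∨ (r, r) ∈ ps := by
  induction ps with
  | nil => intro acc r h; exact Or.inl h
  | cons q t ih =>
    intro acc r h
    rcases ih _ r h with hstep | hmem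
    · beta_reduce at hstep
      by_cases hq : (q.1 == q.2) = true
      · rw [if_pos hq] at hstep
        have h1 : q.1 = r := by injection hstep
        have h2 : q.1 = q.2 := by simpa using hq
        right
        have : q = (r, r) := by obtain ⟨qa, qb⟩ := q; simp_all
        rw [← this]; exact List.mem_cons_self
      · rw [if_neg hq] at hstep
        exact Or.inl hstep
    · exact Or.inr (List.mem_cons_of_mem q hmem)

-- the rank-scan fold starting from some never returns to none
theorem scan_some_isSome (ps : List (Int × Int)) :
    ∀ (x : Int),
    (ps.foldl (fun r p => if p.1 == p.2 then some p.1 else r) (some x)).isSome = true := by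
  induction ps with
  | nil => intro x; rfl
  | cons q t ih =>
    intro x
    simp only [List.foldl_cons]
    by_cases hq : (q.1 == q.2) = true
    · rw [if_pos hq]; exact ih q.1
    · rw [if_neg hq]; exact ih x

-- an equal pair in the list makes the rank-scan fold return some
theorem scan_isSome_of_mem (ps : List (Int × Int)) (q : Int × Int)
    (hq : q ∈ ps) (heq : q.1 = q.2) :
    (ps.foldl (fun r p => if p.1 == p.2 then some p.1 else r) none).isSome = true := by
  induction ps with
  | nil => simp at hq
  | cons p t ih =>
    simp only [List.foldl_cons]
    rcases List.mem_cons.mp hq with h | h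
    · subst h
      rw [if_pos (by simp [heq])]
      exact scan_some_isSome t q.1
    · by_cases hp : (p.1 == p.2) = true
      · rw [if_pos hp]; exact scan_some_isSome t p.1
      · rw [if_neg hp]; exact ih h

-- when no equal pair sits at distance 3 in a sorted list, every count is at most 3
theorem no_four (L : List Int) (hp : L.Pairwise (· ≤ ·))
    (h4 : (L.zip (L.drop 3)).any (fun p => p.1 == p.2) = false) :
    ∀ x ∈ L, L.count x ≤ 3 := by
  intro x hx
  by_contra hc
  have hmem : (x, x) ∈ L.zip (L.drop (2 + 1)) :=
    count_zip_mem L 2 x hp (by omega)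
  have : (L.zip (L.drop 3)).any (fun p => p.1 == p.2) = true :=
    List.any_eq_true.mpr ⟨(x, x), hmem, by simp⟩
  rw [h4] at this
  exact absurd this (by simp)

-- characterisation of B's triple detection on a sorted list, in terms of counts
theorem tripleRankB_isSome (L : List Int) (hp : L.Pairwise (· ≤ ·)) :
    (tripleRankB L).isSome = true
      ↔ ((∀ x ∈ L, L.count x ≤ 3) ∧ ∃ x ∈ L, L.count x = 3) := by
  unfold tripleRankB
  by_cases h4 : (L.zip (L.drop 3)).any (fun p => p.1 == p.2) = true
  · rw [if_pos h4]
    simp only [Option.isSome_none, Bool.false_eq_true, false_iff]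
    rintro ⟨hub, -⟩
    rcases List.any_eq_true.mp h4 with ⟨p, hpmem, hpeq⟩
    have hpe : p.1 = p.2 := by simpa using hpeq
    have hcnt : 2 + 2 ≤ L.count p.1 := by
      have : (p.1, p.2) ∈ L.zip (L.drop (2 + 1)) := by
        simpa using hpmem
      exact zip_eq_count L 2 p.1 p.2 hp this hpe
    have hm : p.1 ∈ L := List.count_pos_iff.mp (by omega)
    have := hub p.1 hm
    omega
  · have h4' : (L.zip (L.drop 3)).any (fun p => p.1 == p.2) = false := by
      simp only [Bool.not_eq_true] at h4; exact h4
    rw [if_neg h4]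
    have hub := no_four L hp h4'
    constructor
    · intro hs
      refine ⟨hub, ?_⟩
      rcases Option.isSome_iff_exists.mp hs with ⟨r, hr⟩
      rcases scan_some_mem _ none r hr with hn | hmem
      · exact absurd hn (by simp)
      · have hmem' : (r, r) ∈ L.zip (L.drop (1 + 1)) := by simpa using hmem
        have h3 : 1 + 2 ≤ L.count r := zip_eq_count L 1 r r hp hmem' rfl
        have hrm : r ∈ L := List.count_pos_iff.mp (by omega)
        exact ⟨r, hrm, by have := hub r hrm; omega⟩
    · rintro ⟨-, x, hxm, hx3⟩
      have hmem : (x, x) ∈ L.zip (L.drop (1 + 1)) :=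
        count_zip_mem L 1 x hp (by omega)
      exact scan_isSome_of_mem _ (x, x) (by simpa using hmem) rfl

theorem tripleRankB_some (L : List Int) (hp : L.Pairwise (· ≤ ·)) (r : Int)
    (h : tripleRankB L = some r) : r ∈ L ∧ L.count r = 3 := by
  have hs : (tripleRankB L).isSome = true := by simp [h]
  have hub := (tripleRankB_isSome L hp).mp hs |>.1
  unfold tripleRankB at h
  by_cases h4 : (L.zip (L.drop 3)).any (fun p => p.1 == p.2) = true
  · rw [if_pos h4] at h; exact absurd h (by simp)
  · rw [if_neg h4] at h
    rcases scan_some_mem _ none r h with hn | hmem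
    · exact absurd hn (by simp)
    · have hmem' : (r, r) ∈ L.zip (L.drop (1 + 1)) := by simpa using hmem
      have h3 : 1 + 2 ≤ L.count r := zip_eq_count L 1 r r hp hmem' rfl
      have hrm : r ∈ L := List.count_pos_iff.mp (by omega)
      exact ⟨hrm, by have := hub r hrm; omega⟩

-- transfer of the characterisation from the sorted list back to the raw value list
theorem tripleRank_sorted_iff (v : List Int) :
    (tripleRankB (PySem.List.sorted v (fun x => x) false)).isSome = true
      ↔ ((∀ x ∈ v, v.count x ≤ 3) ∧ ∃ x ∈ v, v.count x = 3) := by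
  have hperm := PySem.List.sorted_perm (xs := v) (key := fun x => x) (rev := false)
  have hp : (PySem.List.sorted v (fun x => x) false).Pairwise (· ≤ ·) := by
    have := PySem.List.sorted_pairwise (xs := v) (key := fun x => x)
    simpa using this
  rw [tripleRankB_isSome _ hp]
  constructor
  · rintro ⟨hub, x, hxm, hx3⟩
    exact ⟨fun y hy => by rw [← hperm.count_eq]; exact hub y (hperm.mem_iff.mpr hy),
           x, hperm.mem_iff.mp hxm, by rw [← hperm.count_eq]; exact hx3⟩
  · rintro ⟨hub, x, hxm, hx3⟩
    exact ⟨fun y hy => by rw [hperm.count_eq]; exact hub y (hperm.mem_iff.mp hy),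
           x, hperm.mem_iff.mpr hxm, by rw [hperm.count_eq]; exact hx3⟩

theorem tripleRank_sorted_some (v : List Int) (r : Int)
    (h : tripleRankB (PySem.List.sorted v (fun x => x) false) = some r) :
    r ∈ v ∧ v.count r = 3 := by
  have hperm := PySem.List.sorted_perm (xs := v) (key := fun x => x) (rev := false)
  have hp : (PySem.List.sorted v (fun x => x) false).Pairwise (· ≤ ·) := by
    have := PySem.List.sorted_pairwise (xs := v) (key := fun x => x)
    simpa using this
  obtain ⟨hm, hc⟩ := tripleRankB_some _ hp r h
  exact ⟨hperm.mem_iff.mp hm, by rw [← hperm.count_eq]; exact hc⟩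

-- sorted(v)[::-1] is the reverse of the sorted list
theorem sortDesc_eq (v : List Int) :
    sortDescA v = (PySem.List.sorted v (fun x => x) false).reverse := by
  unfold sortDescA
  rw [PySem.List.slice?_none_none_neg_one]
  rfl

-- the two zip loops of high_card agree
theorem highLoop_agree (l : List (Int × Int)) : highLoopA l = highLoopB l := by
  induction l with
  | nil => rfl
  | cons p t ih =>
    obtain ⟨a, b⟩ := p
    unfold highLoopA highLoopB
    rcases lt_trichotomy a b with h | h | h
    · rw [if_neg (by omega), if_pos h, if_pos (by omega), if_neg (by omega)]
    · rw [if_neg (by omega), if_neg (by omega), if_neg (by omega)]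
      exact ih
    · rw [if_pos h, if_pos (by omega), if_pos h]

-- ===== VERDICT (by name: the statement is the Claim_ definition above) =====
theorem three_of_a_kind_spec : Claim_equal_three_of_a_kind := by
  intro c1 c2 _hdom hpre
  obtain ⟨_h1ne, _h2ne, hval, huniq1, huniq2, _htie⟩ := hpre
  have hpv1 : pvVals c1 = valuesA c1 := by
    unfold pvVals valuesA
    exact List.map_congr_left fun s hs =>
      (cval_eq_pv s (hval s (List.mem_append.mpr (Or.inl hs)))).symm
  have hpv2 : pvVals c2 = valuesA c2 := by
    unfold pvVals valuesA
    exact List.map_congr_left fun s hs =>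
      (cval_eq_pv s (hval s (List.mem_append.mpr (Or.inr hs)))).symm
  rw [hpv1] at huniq1
  rw [hpv2] at huniq2
  have hsv1 : sortedValsB c1 = PySem.List.sorted (valuesA c1) (fun x => x) false := rfl
  have hsv2 : sortedValsB c2 = PySem.List.sorted (valuesA c2) (fun x => x) false := rfl
  have hhc : high_cardA c1 c2
      = highLoopB (((PySem.List.sorted (valuesA c1) (fun x => x) false).reverse).zip
                   ((PySem.List.sorted (valuesA c2) (fun x => x) false).reverse)) := by
    unfold high_cardA
    rw [sortDesc_eq, sortDesc_eq, highLoop_agree]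
  unfold Spec_three_of_a_kind
  simp only [three_of_a_kind, three_of_a_kind_alt]
  rw [hsv1, hsv2]
  cases htr1 : tripleRankB (PySem.List.sorted (valuesA c1) (fun x => x) false) with
  | none =>
    have ht1 : ¬ (PySem.List.max? (PySem.Dict.counter (valuesA c1)).values
        (fun x => x) = some 3) := by
      rw [counterMax3_iff, ← tripleRank_sorted_iff]
      simp [htr1]
    cases htr2 : tripleRankB (PySem.List.sorted (valuesA c2) (fun x => x) false) with
    | none =>
      have ht2 : ¬ (PySem.List.max? (PySem.Dict.counter (valuesA c2)).values
          (fun x => x) = some 3) := by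
        rw [counterMax3_iff, ← tripleRank_sorted_iff]
        simp [htr2]
      rw [if_neg ht1, if_neg ht2]
    | some r2 =>
      have ht2 : PySem.List.max? (PySem.Dict.counter (valuesA c2)).values
          (fun x => x) = some 3 := by
        rw [counterMax3_iff, ← tripleRank_sorted_iff]
        simp [htr2]
      rw [if_neg ht1, if_pos ht2]
  | some r1 =>
    have hP1 := (tripleRank_sorted_iff (valuesA c1)).mp (by simp [htr1])
    have ht1 : PySem.List.max? (PySem.Dict.counter (valuesA c1)).values
        (fun x => x) = some 3 := (counterMax3_iff _).mpr hP1
    cases htr2 : tripleRankB (PySem.List.sorted (valuesA c2) (fun x => x) false) with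
    | none =>
      have ht2 : ¬ (PySem.List.max? (PySem.Dict.counter (valuesA c2)).values
          (fun x => x) = some 3) := by
        rw [counterMax3_iff, ← tripleRank_sorted_iff]
        simp [htr2]
      rw [if_pos ht1, if_neg ht2]
    | some r2 =>
      have hP2 := (tripleRank_sorted_iff (valuesA c2)).mp (by simp [htr2])
      have ht2 : PySem.List.max? (PySem.Dict.counter (valuesA c2)).values
          (fun x => x) = some 3 := (counterMax3_iff _).mpr hP2
      obtain ⟨hr1m, hr1c⟩ := tripleRank_sorted_some (valuesA c1) r1 htr1
      obtain ⟨hr2m, hr2c⟩ := tripleRank_sorted_some (valuesA c2) r2 htr2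
      -- A's argmax is the first value with count 3; Pre_'s uniqueness pins it to r1/r2
      obtain ⟨x1, hx1m, hx1c⟩ := hP1.2
      obtain ⟨x2, hx2m, hx2c⟩ := hP2.2
      have hfs1 : ((valuesA c1).find? (fun x => (valuesA c1).count x == 3)).isSome
          = true := List.find?_isSome.mpr ⟨x1, hx1m, by simp [hx1c]⟩
      have hfs2 : ((valuesA c2).find? (fun x => (valuesA c2).count x == 3)).isSome
          = true := List.find?_isSome.mpr ⟨x2, hx2m, by simp [hx2c]⟩
      obtain ⟨t1, hf1⟩ := Option.isSome_iff_exists.mp hfs1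
      obtain ⟨t2, hf2⟩ := Option.isSome_iff_exists.mp hfs2
      have ht1m : t1 ∈ valuesA c1 := List.mem_of_find?_eq_some hf1
      have ht1c : (valuesA c1).count t1 = 3 := by
        have := List.find?_some hf1; simpa using this
      have ht2m : t2 ∈ valuesA c2 := List.mem_of_find?_eq_some hf2
      have ht2c : (valuesA c2).count t2 = 3 := by
        have := List.find?_some hf2; simpa using this
      have het1 : t1 = r1 := huniq1 t1 ht1m r1 hr1m ht1c hr1c
      have het2 : t2 = r2 := huniq2 t2 ht2m r2 hr2m ht2c hr2c
      rw [if_pos ht1, if_pos ht2,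
          counter_argmax _ hP1.1 hP1.2, counter_argmax _ hP2.1 hP2.2, hf1, hf2]
      subst het1
      subst het2
      simp only []
      rcases lt_trichotomy t1 t2 with h | h | h
      · rw [if_neg (by omega), if_pos h, if_pos (by omega), if_neg (by omega)]
      · rw [if_neg (by omega), if_neg (by omega), if_neg (by omega), hhc]
      · rw [if_pos h, if_pos (by omega), if_pos h]
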